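-- pv_equiv track=rewrite | github.com/miczho/competitive-coding | leetcode-1872.py | stoneGameVIII
-- ===== SOURCE A (Python) =====
-- def stoneGameVIII(stones):
--     """
--     :type stones: List[int]
--     :rtype: int
--     """
--     n = len(stones)
--     ans = 0
--
--     psum = [0]
--     for x in stones:
--         psum.append(psum[-1] + x)
--
--     dp = dict()
--     def dfs(pos, turn):
--         if pos >= n-1: return 0
--
--         if (pos, turn) not in dp:
--             if turn == 0:
--                 res = float('-inf')
--                 for i in range(pos+1, n):
--                     res = max(res, psum[i+1] + dfs(i, turn^1))
--             else:
--                 res = float('inf')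
--                 for i in range(pos+1, n):
--                     res = min(res, -psum[i+1] + dfs(i, turn^1))
--
--             dp[(pos, turn)] = res
--
--         return dp[(pos, turn)]
--
--     return dfs(0, 0)
-- ===== SOURCE B (Python) =====
-- def stoneGameVIII(stones):
--     """
--     :type stones: List[int]
--     :rtype: int
--     """
--     n = len(stones)
--     if n < 2:
--         return 0
--     pre = sum(stones)          # prefix sum psum[n]
--     dp = pre                   # best difference when the first taken prefix is the whole array
--     for i in range(n - 1, 1, -1):
--         pre -= stones[i]       # pre = psum[i] = stones[0] + ... + stones[i-1]
--         dp = max(dp, pre - dp)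
--     return dp
-- ===== Notes on version B (the rewrite author's own statement) =====
-- stated objective: faster
-- what changed: Replaced the memoized two-player minimax recursion (quadratic: each state scans all later split points) by a single right-to-left pass over prefix sums using the suffix recurrence dp = max(dp, prefix[i] - dp).
import Mathlib
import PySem

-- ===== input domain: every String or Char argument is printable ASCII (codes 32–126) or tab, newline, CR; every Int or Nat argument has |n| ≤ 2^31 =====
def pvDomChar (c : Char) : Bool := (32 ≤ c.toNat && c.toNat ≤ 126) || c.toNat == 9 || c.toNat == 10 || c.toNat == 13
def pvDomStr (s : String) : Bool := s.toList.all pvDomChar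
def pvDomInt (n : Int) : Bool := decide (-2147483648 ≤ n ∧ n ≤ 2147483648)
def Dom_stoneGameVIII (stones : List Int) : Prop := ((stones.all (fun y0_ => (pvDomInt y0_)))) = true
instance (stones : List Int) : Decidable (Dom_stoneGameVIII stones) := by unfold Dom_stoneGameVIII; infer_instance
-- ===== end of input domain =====

-- B replaces A's memoized minimax recursion by a single right-to-left pass over prefix
-- sums (dp = max(dp, prefix[i] - dp)); equivalence of the return values is proved below.

-- ===== PORT A =====
-- Python's `turn ^ 1`; `turn` only ever holds 0 or 1, where this is exact.
def pvXor1 (turn : Int) : Int := if turn == 0 then 1 else 0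

-- Python's float('-inf') / float('inf') loop seeds are modelled as Option.none
-- (the loop over range(pos+1, n) is nonempty whenever it runs, so the seed never survives).
def pvOMax (r : Option Int) (x : Int) : Option Int :=
  some (match r with | none => x | some v => max v x)
def pvOMin (r : Option Int) (x : Int) : Option Int :=
  some (match r with | none => x | some v => min v x)

-- the inner recursion `dfs(pos, turn)`; the dict `dp` of A is a pure memo cache of this
-- recursion's own values and does not change any returned value, so it is not threaded.
-- psum[i+1] is rendered with pyGetD (the index is always in range here).
def pvDfs (psum : List Int) (n : Int) (pos turn : Int) : Int :=
  if _h : pos ≥ n - 1 then 0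
  else
    let res : Option Int :=
      if turn == 0 then
        (PySem.List.pyRange (pos+1) n 1).attach.foldl
          (fun r i => pvOMax r (PySem.List.pyGetD psum (i.1+1) 0 + pvDfs psum n i.1 (pvXor1 turn))) none
      else
        (PySem.List.pyRange (pos+1) n 1).attach.foldl
          (fun r i => pvOMin r (-(PySem.List.pyGetD psum (i.1+1) 0) + pvDfs psum n i.1 (pvXor1 turn))) none
    res.getD 0   -- unreachable default: res is `some _` (the loop ran at least once)
termination_by (n - pos).toNat
decreasing_by
  · have := (PySem.List.mem_pyRange_one.mp i.2); omega
  · have := (PySem.List.mem_pyRange_one.mp i.2); omega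

def stoneGameVIII (stones : List Int) : Int :=
  let n : Int := stones.length
  let psum : List Int :=
    stones.foldl (fun ps x => ps ++ [PySem.List.pyGetD ps (-1) 0 + x]) [0]
  pvDfs psum n 0 0

-- ===== PORT B =====
def stoneGameVIII_alt (stones : List Int) : Int :=
  let n : Int := stones.length
  if n < 2 then 0
  else
    ((PySem.List.pyRange (n-1) 1 (-1)).foldl
      (fun (p : Int × Int) i =>
        let pre := p.1 - PySem.List.pyGetD stones i 0
        (pre, max p.2 (pre - p.2)))
      (stones.sum, stones.sum)).2

-- ===== PRECONDITION & SPEC =====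
def Spec_stoneGameVIII (stones : List Int) (out : Int) : Prop := out = stoneGameVIII_alt stones
instance (stones : List Int) (out : Int) : Decidable (Spec_stoneGameVIII stones out) := by unfold Spec_stoneGameVIII; infer_instance

-- ===== CLAIM (what is proved, stated in full; the proofs are below) =====
def Claim_equal_stoneGameVIII : Prop := ∀ (stones : List Int), Dom_stoneGameVIII stones → Spec_stoneGameVIII stones (stoneGameVIII stones)

-- ===== LEMMAS AND PROOFS =====

-- prefix sum of the first j elements (j an Int index, 0 ≤ j ≤ length)
def pvP (stones : List Int) (j : Int) : Int := (stones.take j.toNat).sum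

-- the suffix-DP value: pvF pos = optimal score difference from split point pos
def pvF (stones : List Int) (pos : Int) : Int :=
  if (stones.length : Int) - 2 ≤ pos then stones.sum
  else max (pvF stones (pos+1)) (pvP stones (pos+2) - pvF stones (pos+1))
termination_by ((stones.length : Int) - pos).toNat
decreasing_by omega

-- pvF extended by 0 at the last position (the value dfs returns at pos = n-1)
def pvG (stones : List Int) (i : Int) : Int :=
  if (stones.length : Int) - 1 ≤ i then 0 else pvF stones i

theorem pvOMax_foldl_some (g : Int → Int) (l : List Int) (b : Int) :
    l.foldl (fun r i => pvOMax r (g i)) (some b)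
      = some (l.foldl (fun v i => max v (g i)) b) := by
  induction l generalizing b with
  | nil => rfl
  | cons x t ih => simp only [List.foldl_cons, pvOMax]; exact ih _

theorem pvOMin_foldl_some (g : Int → Int) (l : List Int) (b : Int) :
    l.foldl (fun r i => pvOMin r (g i)) (some b)
      = some (l.foldl (fun v i => min v (g i)) b) := by
  induction l generalizing b with
  | nil => rfl
  | cons x t ih => simp only [List.foldl_cons, pvOMin]; exact ih _

theorem foldl_max_init (g : Int → Int) (l : List Int) (a b : Int) :
    l.foldl (fun v i => max v (g i)) (max a b)
      = max a (l.foldl (fun v i => max v (g i)) b) := by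
  induction l generalizing b with
  | nil => rfl
  | cons x t ih =>
    simp only [List.foldl_cons]
    rw [max_assoc, ih]

theorem foldl_min_eq_neg_max (g : Int → Int) (l : List Int) (b : Int) :
    l.foldl (fun v i => min v (g i)) b
      = -(l.foldl (fun v i => max v (-(g i))) (-b)) := by
  induction l generalizing b with
  | nil => simp
  | cons x t ih =>
    simp only [List.foldl_cons]
    rw [ih]
    have h : -(min b (g x)) = max (-b) (-(g x)) := by omega
    rw [h]

-- core of the recurrence: the running max that dfs(pos, 0) computes equals pvF pos
theorem pvMaxcore (stones : List Int) (pos : Int) (h0 : 0 ≤ pos)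
    (h2 : pos ≤ (stones.length : Int) - 2) :
    (PySem.List.pyRange (pos+2) (stones.length : Int) 1).foldl
        (fun v i => max v (pvP stones (i+1) - pvG stones i))
        (pvP stones (pos+2) - pvG stones (pos+1))
      = pvF stones pos := by
  by_cases hlast : (stones.length : Int) - 2 ≤ pos
  · -- pos = n-2 : the range is empty, the seed is psum[n] - 0 = total
    have hp : pos = (stones.length : Int) - 2 := le_antisymm h2 hlast
    rw [PySem.List.pyRange_one_eq_nil (by omega)]
    simp only [List.foldl_nil]
    rw [pvF]
    rw [if_pos hlast]
    have hG : pvG stones (pos+1) = 0 := by rw [pvG, if_pos (by omega)]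
    have hP : pvP stones (pos+2) = stones.sum := by
      rw [pvP]
      have : (pos+2).toNat = stones.length := by omega
      rw [this, List.take_length]
    rw [hG, hP]; ring
  · -- pos < n-2 : peel one element and use the recurrence
    have hcons : PySem.List.pyRange (pos+2) (stones.length : Int) 1
        = (pos+2) :: PySem.List.pyRange (pos+2+1) (stones.length : Int) 1 :=
      PySem.List.pyRange_one_cons (by omega)
    rw [hcons]
    simp only [List.foldl_cons]
    rw [foldl_max_init]
    have ih := pvMaxcore stones (pos+1) (by omega) (by omega)
    have e3 : pos+1+2 = pos+2+1 := by ring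
    have e4 : pos+1+1 = pos+2 := by ring
    rw [e3, e4] at ih
    rw [ih]
    have hG : pvG stones (pos+1) = pvF stones (pos+1) := by rw [pvG, if_neg (by omega)]
    have hFpos : pvF stones pos
        = max (pvF stones (pos+1)) (pvP stones (pos+2) - pvF stones (pos+1)) := by
      conv_lhs => rw [pvF]
      rw [if_neg (by omega)]
    rw [hG, hFpos, max_comm]
termination_by ((stones.length : Int) - pos).toNat
decreasing_by omega

-- unfolding pvDfs in its two live branches (pvXor1 0 / pvXor1 1 reduce to 1 / 0)
theorem pvDfs_unfold0 (psum : List Int) (n pos : Int) (h : ¬ pos ≥ n - 1) :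
    pvDfs psum n pos 0 =
      ((PySem.List.pyRange (pos+1) n 1).attach.foldl
        (fun r i => pvOMax r (PySem.List.pyGetD psum (i.1+1) 0 + pvDfs psum n i.1 1)) none).getD 0 := by
  rw [pvDfs, dif_neg h]
  rfl

theorem pvDfs_unfold1 (psum : List Int) (n pos : Int) (h : ¬ pos ≥ n - 1) :
    pvDfs psum n pos 1 =
      ((PySem.List.pyRange (pos+1) n 1).attach.foldl
        (fun r i => pvOMin r (-(PySem.List.pyGetD psum (i.1+1) 0) + pvDfs psum n i.1 0)) none).getD 0 := by
  rw [pvDfs, dif_neg h]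
  rfl

-- dfs(pos, 0) = pvF pos and dfs(pos, 1) = -pvF pos, given psum is the prefix-sum table
theorem pvDfs_eq (stones psum : List Int)
    (hps : ∀ j : Int, 0 ≤ j → j ≤ (stones.length : Int) →
      PySem.List.pyGetD psum j 0 = pvP stones j)
    (pos : Int) (h0 : 0 ≤ pos) (h2 : pos ≤ (stones.length : Int) - 2) :
    pvDfs psum (stones.length : Int) pos 0 = pvF stones pos ∧
    pvDfs psum (stones.length : Int) pos 1 = -(pvF stones pos) := by
  have hdfs1 : ∀ i : Int, pos + 1 ≤ i → i < (stones.length : Int) →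
      pvDfs psum (stones.length : Int) i 1 = -(pvG stones i) := by
    intro i hi1 hi2
    by_cases hlast : (stones.length : Int) - 1 ≤ i
    · rw [pvDfs, dif_pos (by omega), pvG, if_pos hlast]; ring
    · have := (pvDfs_eq stones psum hps i (by omega) (by omega)).2
      rw [this, pvG, if_neg hlast]
  have hdfs0 : ∀ i : Int, pos + 1 ≤ i → i < (stones.length : Int) →
      pvDfs psum (stones.length : Int) i 0 = pvG stones i := by
    intro i hi1 hi2
    by_cases hlast : (stones.length : Int) - 1 ≤ i
    · rw [pvDfs, dif_pos (by omega), pvG, if_pos hlast]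
    · have := (pvDfs_eq stones psum hps i (by omega) (by omega)).1
      rw [this, pvG, if_neg hlast]
  have hcons : PySem.List.pyRange (pos+1) (stones.length : Int) 1
      = (pos+1) :: PySem.List.pyRange (pos+1+1) (stones.length : Int) 1 :=
    PySem.List.pyRange_one_cons (by omega)
  have hterm : ∀ i : Int, i ∈ PySem.List.pyRange (pos+1) (stones.length : Int) 1 →
      PySem.List.pyGetD psum (i+1) 0 = pvP stones (i+1) := by
    intro i hi
    have hb := PySem.List.mem_pyRange_one.mp hi
    exact hps (i+1) (by omega) (by omega)
  have e2 : pos+1+1 = pos+2 := by ring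
  constructor
  · rw [pvDfs_unfold0 _ _ _ (by omega)]
    rw [List.foldl_attach
      (f := fun r i => pvOMax r (PySem.List.pyGetD psum (i+1) 0 + pvDfs psum (stones.length : Int) i 1))]
    have hcongr := PySem.List.foldl_congr_mem
      (PySem.List.pyRange (pos+1) (stones.length : Int) 1)
      (fun r i => pvOMax r (PySem.List.pyGetD psum (i+1) 0 + pvDfs psum (stones.length : Int) i 1))
      (fun r i => pvOMax r (pvP stones (i+1) - pvG stones i))
      none
      (by
        intro acc x hx
        have hb := PySem.List.mem_pyRange_one.mp hx
        simp only [hterm x hx, hdfs1 x hb.1 hb.2]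
        have harg : pvP stones (x+1) + -pvG stones x = pvP stones (x+1) - pvG stones x := by
          ring
        rw [harg])
    rw [hcongr]
    rw [hcons, List.foldl_cons]
    have hseed : pvOMax none (pvP stones (pos+1+1) - pvG stones (pos+1))
        = some (pvP stones (pos+1+1) - pvG stones (pos+1)) := rfl
    rw [hseed, pvOMax_foldl_some, e2, pvMaxcore stones pos h0 h2]
    rfl
  · rw [pvDfs_unfold1 _ _ _ (by omega)]
    rw [List.foldl_attach
      (f := fun r i => pvOMin r (-(PySem.List.pyGetD psum (i+1) 0) + pvDfs psum (stones.length : Int) i 0))]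
    have hcongr := PySem.List.foldl_congr_mem
      (PySem.List.pyRange (pos+1) (stones.length : Int) 1)
      (fun r i => pvOMin r (-(PySem.List.pyGetD psum (i+1) 0) + pvDfs psum (stones.length : Int) i 0))
      (fun r i => pvOMin r (-(pvP stones (i+1) - pvG stones i)))
      none
      (by
        intro acc x hx
        have hb := PySem.List.mem_pyRange_one.mp hx
        simp only [hterm x hx, hdfs0 x hb.1 hb.2]
        have harg : -pvP stones (x+1) + pvG stones x = -(pvP stones (x+1) - pvG stones x) := by
          ring
        rw [harg])
    rw [hcongr]
    rw [hcons, List.foldl_cons]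
    have hseed : pvOMin none (-(pvP stones (pos+1+1) - pvG stones (pos+1)))
        = some (-(pvP stones (pos+1+1) - pvG stones (pos+1))) := rfl
    rw [hseed, pvOMin_foldl_some,
      foldl_min_eq_neg_max (fun i => -(pvP stones (i+1) - pvG stones i))]
    simp only [neg_neg]
    rw [e2, pvMaxcore stones pos h0 h2]
    rfl
termination_by ((stones.length : Int) - pos).toNat
decreasing_by all_goals omega

-- A's psum loop builds the prefix-sum table
theorem pvPsum_eq (stones : List Int) :
    stones.foldl (fun ps x => ps ++ [PySem.List.pyGetD ps (-1) 0 + x]) [0]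
      = (List.range (stones.length + 1)).map (fun i => ((stones.take i).sum : Int)) := by
  induction stones using List.reverseRecOn with
  | nil => simp
  | append_singleton l x ih =>
    rw [List.foldl_append, List.foldl_cons, List.foldl_nil, ih]
    have hsplit : (List.range (l.length + 1)).map (fun i => ((l.take i).sum : Int))
        = (List.range l.length).map (fun i => ((l.take i).sum : Int)) ++ [l.sum] := by
      rw [List.range_succ, List.map_append]
      simp
    rw [hsplit, PySem.List.pyGetD_neg_one_append_singleton]
    rw [List.length_append, List.length_singleton, List.range_succ, List.map_append]
    congr 1
    · rw [← hsplit]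
      apply List.map_congr_left
      intro i hi
      have hi' := List.mem_range.mp hi
      rw [List.take_append_of_le_length (by omega)]
    · simp

theorem pvPsum_getD (stones : List Int) (j : Int) (h0 : 0 ≤ j)
    (hj : j ≤ (stones.length : Int)) :
    PySem.List.pyGetD
        (stones.foldl (fun ps x => ps ++ [PySem.List.pyGetD ps (-1) 0 + x]) [0]) j 0
      = pvP stones j := by
  rw [pvPsum_eq, PySem.List.pyGetD_of_nonneg _ _ h0,
    PySem.List.getD_map_range _ _ _ _ (by omega)]
  rfl

-- B's loop invariant: scanning i = k, k-1, …, 2 turns (psum[k+1], pvF (k-1)) into pvF 0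
theorem pvBinv (stones : List Int) (hn : 2 ≤ (stones.length : Int)) (k : Int)
    (h1 : 1 ≤ k) (hk : k ≤ (stones.length : Int) - 1) :
    ((PySem.List.pyRange k 1 (-1)).foldl
      (fun (p : Int × Int) i =>
        let pre := p.1 - PySem.List.pyGetD stones i 0
        (pre, max p.2 (pre - p.2)))
      (pvP stones (k+1), pvF stones (k-1))).2 = pvF stones 0 := by
  by_cases hone : k = 1
  · subst hone
    rw [PySem.List.pyRange_neg_one_eq_nil (by omega)]
    simp
  · have hcons : PySem.List.pyRange k 1 (-1) = k :: PySem.List.pyRange (k-1) 1 (-1) :=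
      PySem.List.pyRange_neg_one_cons (by omega)
    rw [hcons, List.foldl_cons]
    have hpre : pvP stones (k+1) - PySem.List.pyGetD stones k 0 = pvP stones k := by
      rw [PySem.List.pyGetD_of_nonneg _ _ (by omega)]
      have hkn : (k+1).toNat = k.toNat + 1 := by omega
      have hget : stones[k.toNat]? = some stones[k.toNat] := List.getElem?_eq_getElem (by omega)
      rw [pvP, pvP, hkn, List.take_add_one, List.sum_append, List.getD_eq_getElem?_getD, hget]
      simp
    have hdp : max (pvF stones (k-1)) (pvP stones k - pvF stones (k-1))
        = pvF stones (k-2) := by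
      conv_rhs => rw [pvF]
      rw [if_neg (by omega)]
      have e1 : k - 2 + 1 = k - 1 := by ring
      have e2 : k - 2 + 2 = k := by ring
      rw [e1, e2]
    simp only []
    rw [hpre, hdp]
    have := pvBinv stones hn (k-1) (by omega) (by omega)
    have e1 : k - 1 + 1 = k := by ring
    have e2 : k - 1 - 1 = k - 2 := by ring
    rw [e1, e2] at this
    exact this
termination_by k.toNat
decreasing_by omega

-- ===== VERDICT (by name: the statement is the Claim_ definition above) =====
theorem stoneGameVIII_spec : Claim_equal_stoneGameVIII := by
  intro stones _
  unfold Spec_stoneGameVIII stoneGameVIII stoneGameVIII_alt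
  by_cases hn : (stones.length : Int) < 2
  · simp only []
    rw [if_pos hn, pvDfs, dif_pos (by omega)]
  · simp only []
    rw [if_neg hn]
    have hA := (pvDfs_eq stones _ (pvPsum_getD stones) 0 le_rfl (by omega)).1
    rw [hA]
    have hB := pvBinv stones (by omega) ((stones.length : Int) - 1) (by omega) (by omega)
    have e1 : (stones.length : Int) - 1 + 1 = (stones.length : Int) := by ring
    rw [e1] at hB
    have hP : pvP stones (stones.length : Int) = stones.sum := by
      rw [pvP]
      have : ((stones.length : Int)).toNat = stones.length := by omega
      rw [this, List.take_length]
    have hF : pvF stones ((stones.length : Int) - 1 - 1) = stones.sum := by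
      rw [pvF, if_pos (by omega)]
    rw [hP, hF] at hB
    rw [hB]
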